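-- pv_equiv track=rewrite | github.com/krishna19-me/interview_practice | personal-practice/python-programs/flatten-and-count.py | flatten_and_count
-- ===== SOURCE A (Python) =====
-- def flatten_and_count(lst):
--     flatlst = []
--     dict1 = {}
--     for l in lst:
--         flatlst.extend(l)
--     for num in flatlst:
--         if num in dict1:
--             dict1[num] += 1
--         else:
--             dict1[num] = 1
--     return dict1
-- ===== SOURCE B (Python) =====
-- def flatten_and_count(lst):
--     dict1 = {}
--     for sub in lst:
--         for x in sub:
--             dict1[x] = dict1.get(x, 0) + 1
--     return dict1
-- ===== Notes on version B (the rewrite author's own statement) =====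
-- stated objective: simpler
-- what changed: Fuses A's two sequential passes (materialize a flat list, then count it) into one nested traversal that updates the count dict directly via dict.get, never building the intermediate list.
import Mathlib
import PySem

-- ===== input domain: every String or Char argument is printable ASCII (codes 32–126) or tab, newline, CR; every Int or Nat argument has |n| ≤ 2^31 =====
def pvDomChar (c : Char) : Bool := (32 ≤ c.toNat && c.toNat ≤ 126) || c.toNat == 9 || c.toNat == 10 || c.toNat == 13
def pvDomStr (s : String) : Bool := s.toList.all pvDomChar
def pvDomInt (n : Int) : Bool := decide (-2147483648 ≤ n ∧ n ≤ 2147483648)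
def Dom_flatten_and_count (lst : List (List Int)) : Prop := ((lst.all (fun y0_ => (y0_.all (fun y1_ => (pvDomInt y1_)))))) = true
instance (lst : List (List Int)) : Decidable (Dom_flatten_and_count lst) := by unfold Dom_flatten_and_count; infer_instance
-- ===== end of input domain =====

-- B fuses A's two passes (flatten, then count) into one nested traversal updating the dict directly.

-- ===== PORT A =====
def flatten_and_count (lst : List (List Int)) : List (Int × Int) :=
  let flatlst : List Int := lst.foldl (fun acc l => acc ++ l) []
  let dict1 : PySem.Dict Int Int :=
    flatlst.foldl (fun d num =>
      if d.contains num then d.insert num (d.getD num 0 + 1) else d.insert num 1)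
      PySem.Dict.empty
  dict1.items

-- ===== PORT B =====
def flatten_and_count_alt (lst : List (List Int)) : List (Int × Int) :=
  (lst.foldl (fun d sub =>
    sub.foldl (fun d x => d.insert x (d.getD x 0 + 1)) d)
    PySem.Dict.empty).items

-- ===== PRECONDITION & SPEC =====
def Spec_flatten_and_count (lst : List (List Int)) (out : List (Int × Int)) : Prop := out = flatten_and_count_alt lst
instance (lst : List (List Int)) (out : List (Int × Int)) : Decidable (Spec_flatten_and_count lst out) := by unfold Spec_flatten_and_count; infer_instance

-- ===== CLAIM (what is proved, stated in full; the proofs are below) =====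
def Claim_equal_flatten_and_count : Prop := ∀ (lst : List (List Int)), Dom_flatten_and_count lst → Spec_flatten_and_count lst (flatten_and_count lst)

-- ===== LEMMAS AND PROOFS =====

-- A's branch on containment is the unconditional insert of getD+1 (absent key reads 0).
theorem stepA_eq_stepB (d : PySem.Dict Int Int) (x : Int) :
    (if d.contains x then d.insert x (d.getD x 0 + 1) else d.insert x 1)
      = d.insert x (d.getD x 0 + 1) := by
  by_cases h : d.contains x = true
  · simp [h]
  · have h0 : d.contains x = false := by
      cases hc : d.contains x
      · rfl
      · exact absurd hc h
    rw [h0, PySem.Dict.getD_of_not_contains d 0 h0]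
    norm_num

-- A's extend loop builds acc ++ flatten lst.
theorem foldl_append_eq (lst : List (List Int)) (acc : List Int) :
    lst.foldl (fun acc l => acc ++ l) acc = acc ++ lst.flatten := by
  induction lst generalizing acc with
  | nil => simp
  | cons h t ih => simp [List.foldl_cons, ih, List.append_assoc]

-- ===== VERDICT (by name: the statement is the Claim_ definition above) =====

theorem flatten_and_count_spec : Claim_equal_flatten_and_count := by
  intro lst _
  show flatten_and_count lst = flatten_and_count_alt lst
  unfold flatten_and_count flatten_and_count_alt
  simp only [foldl_append_eq, List.nil_append, stepA_eq_stepB, List.foldl_flatten]
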